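-- pv_equiv track=rewrite | github.com/UnB-KnEDLe/DODFMiner | dodfminer/extract/polished/backend/seg.py | _extract_acts
-- ===== SOURCE A (Python) =====
-- def _extract_acts(text, prediction):
--     """Extract and join words predicted to be part of an act.
--
--     Args:
--         text (list): List of words in an act.
--         prediction (list): Predictions made for each word in the act.
--
--     """
--     acts = []
--
--     current_act = []
--     reading_act = False
--     for i in range(len(prediction)):
--         if prediction[i][0] == 'B':  # B-ato
--             reading_act = True
--             current_act.append(text[i])
--             continue
--
--         if reading_act:
--             current_act.append(text[i])
--
--         if reading_act and prediction[i][0] == 'E':  # E-ato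
--             acts.append(' '.join(current_act))
--             current_act = []
--             reading_act = False
--
--     if reading_act:
--         acts.append(' '.join(current_act))
--
--     return acts
-- ===== SOURCE B (Python) =====
-- import re
--
-- def _extract_acts(text, prediction):
--     """Regex scan over the encoded tag stream instead of a flag-based state machine."""
--     tags = ''.join(p[0] for p in prediction)
--     return [' '.join(text[i] for i in range(m.start(), m.end()))
--             for m in re.finditer(r'B[^E]*(?:E|$)', tags)]
-- ===== Notes on version B (the rewrite author's own statement) =====
-- stated objective: idiomatic
-- what changed: Replaces the flag-based state machine with a single regex scan over the encoded tag stream (first chars of predictions), each match span yielding one act.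
import Mathlib
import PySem

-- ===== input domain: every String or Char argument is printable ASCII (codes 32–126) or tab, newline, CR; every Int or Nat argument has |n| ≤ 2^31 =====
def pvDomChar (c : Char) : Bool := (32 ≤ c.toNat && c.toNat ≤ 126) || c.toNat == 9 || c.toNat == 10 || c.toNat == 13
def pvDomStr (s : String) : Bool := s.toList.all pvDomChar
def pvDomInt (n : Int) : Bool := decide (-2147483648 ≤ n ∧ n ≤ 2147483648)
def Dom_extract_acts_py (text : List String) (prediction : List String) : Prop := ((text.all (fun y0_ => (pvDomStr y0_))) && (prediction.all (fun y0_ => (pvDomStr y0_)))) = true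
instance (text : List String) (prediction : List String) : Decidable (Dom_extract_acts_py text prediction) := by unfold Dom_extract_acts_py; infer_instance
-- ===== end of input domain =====

-- B replaces A's flag-based state machine by a regex-style scan over the tag stream (idiomatic,
-- same cost); equivalence of the return values is proved on Pre_ (exactly the inputs where the
-- Python A returns without raising).

-- ===== PORT A =====
-- s[0] for a string s; exact whenever s is nonempty (guaranteed inside Pre_).
def pvFirstCh (s : String) : Char := s.toList.headD ' '

-- one iteration of A's for-loop; state = (acts, current_act, reading_act)
def pvStepA (text : List String) (prediction : List String)
    (st : List String × List String × Bool) (i : Nat) :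
    List String × List String × Bool :=
  let acts := st.1
  let cur := st.2.1
  let reading := st.2.2
  -- text[i] / prediction[i]: i is always in range for prediction; in range for text inside Pre_
  if pvFirstCh (prediction.getD i "") = 'B' then
    (acts, cur ++ [text.getD i ""], true)
  else
    let cur2 := if reading then cur ++ [text.getD i ""] else cur
    if reading && (pvFirstCh (prediction.getD i "") = 'E' : Bool) then
      (acts ++ [PySem.Str.join " " cur2], [], false)
    else
      (acts, cur2, reading)

def extract_acts_py (text : List String) (prediction : List String) : List String :=
  let st := (List.range prediction.length).foldl (pvStepA text prediction) ([], [], false)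
  if st.2.2 then st.1 ++ [PySem.Str.join " " st.2.1] else st.1

-- ===== PORT B =====
-- hand port of re.finditer(r'B[^E]*(?:E|$)', tags): spans (start, end) of all matches,
-- scanning from position i; pvScanIn is "inside a match started at s".
mutual
def pvScanOut : List Char → Nat → List (Nat × Nat)
  | [], _ => []
  | c :: rest, i => if c = 'B' then pvScanIn rest (i + 1) i else pvScanOut rest (i + 1)
def pvScanIn : List Char → Nat → Nat → List (Nat × Nat)
  | [], i, s => [(s, i)]
  | c :: rest, i, s => if c = 'E' then (s, i + 1) :: pvScanOut rest (i + 1) else pvScanIn rest (i + 1) s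
end

def extract_acts_py_alt (text : List String) (prediction : List String) : List String :=
  let tags := prediction.map pvFirstCh
  (pvScanOut tags 0).map (fun se =>
    PySem.Str.join " " ((List.range' se.1 (se.2 - se.1)).map (fun i => text.getD i "")))

-- ===== PRECONDITION & SPEC =====
-- Pre_ is exactly the set of inputs on which Python A returns (no narrowing): every prediction is
-- nonempty (else prediction[i][0] raises IndexError) and every word index the machine reads —
-- a 'B' position, or a position still inside an open act — is a valid index of text
-- (else text[i] raises IndexError). Both ports are totalised with default reads, so the
-- proved equality holds without using the Pre_ hypothesis; Pre_ only delimits where Python A returns.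
def Pre_extract_acts_py (text : List String) (prediction : List String) : Prop :=
  (∀ p ∈ prediction, p ≠ "") ∧
  ∀ i < prediction.length,
    ((prediction.getD i "").toList.headD ' ' = 'B' ∨
     ∃ j < i, (prediction.getD j "").toList.headD ' ' = 'B' ∧
       ∀ k < i, j < k → (prediction.getD k "").toList.headD ' ' ≠ 'E') →
    i < text.length
instance (text : List String) (prediction : List String) : Decidable (Pre_extract_acts_py text prediction) := by unfold Pre_extract_acts_py; infer_instance

def pvWitness_extract_acts_py : List String × List String :=
  (["Sec.", "1", "ato", "fim", "x"], ["B-ato", "I-ato", "I-ato", "E-ato", "O"])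

def Spec_extract_acts_py (text : List String) (prediction : List String) (out : List String) : Prop := out = extract_acts_py_alt text prediction
instance (text : List String) (prediction : List String) (out : List String) : Decidable (Spec_extract_acts_py text prediction out) := by unfold Spec_extract_acts_py; infer_instance

-- ===== CLAIM (what is proved, stated in full; the proofs are below) =====
def Claim_equal_extract_acts_py : Prop := ∀ (text : List String) (prediction : List String), Dom_extract_acts_py text prediction → Pre_extract_acts_py text prediction → Spec_extract_acts_py text prediction (extract_acts_py text prediction)

-- ===== LEMMAS AND PROOFS =====

-- join shorthand
def pvJoin (l : List String) : String := PySem.Str.join " " l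

-- words of text at absolute indices s, s+1, …, s+k-1 (default "")
def pvWords (tx : List String) (s k : Nat) : List String :=
  (List.range' s k).map (fun i => tx.getD i "")

-- zip of (word, tag) over prediction positions, text read with default ""
def pvZipD : List String → List String → List (String × Char)
  | _, [] => []
  | tx, p :: ps => (tx.headD "", pvFirstCh p) :: pvZipD tx.tail ps

-- common functional specification: the list of joined acts
mutual
def pvSpecOut : List (String × Char) → List String
  | [] => []
  | (w, c) :: rest => if c = 'B' then pvSpecIn rest [w] else pvSpecOut rest
def pvSpecIn : List (String × Char) → List String → List String
  | [], cur => [pvJoin cur]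
  | (w, c) :: rest, cur =>
    if c = 'B' then pvSpecIn rest (cur ++ [w])
    else if c = 'E' then pvJoin (cur ++ [w]) :: pvSpecOut rest
    else pvSpecIn rest (cur ++ [w])
end

-- A's step, reformulated on a (word, tag) pair
def pvStepZ (st : List String × List String × Bool) (wc : String × Char) :
    List String × List String × Bool :=
  if wc.2 = 'B' then (st.1, st.2.1 ++ [wc.1], true)
  else
    let cur2 := if st.2.2 then st.2.1 ++ [wc.1] else st.2.1
    if st.2.2 && (wc.2 = 'E' : Bool) then (st.1 ++ [pvJoin cur2], [], false)
    else (st.1, cur2, st.2.2)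

-- A's final flush
def pvPost (st : List String × List String × Bool) : List String :=
  if st.2.2 then st.1 ++ [pvJoin st.2.1] else st.1

theorem pvZipD_eq (pr : List String) : ∀ tx : List String,
    (List.range pr.length).map (fun i => (tx.getD i "", pvFirstCh (pr.getD i ""))) = pvZipD tx pr := by
  induction pr with
  | nil => intro tx; simp [pvZipD]
  | cons p ps ih =>
    intro tx
    simp only [List.length_cons, List.range_succ_eq_map, List.map_cons, List.map_map]
    refine congrArg₂ _ (by cases tx <;> simp [List.getD]) ?_
    rw [← ih tx.tail]
    exact List.map_congr_left (fun i _ => by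
      simp [Function.comp])

-- A's loop computes pvSpecOut / pvSpecIn
theorem pvFoldA (z : List (String × Char)) :
    (∀ acts cur, pvPost (z.foldl pvStepZ (acts, cur, true)) = acts ++ pvSpecIn z cur) ∧
    (∀ acts, pvPost (z.foldl pvStepZ (acts, [], false)) = acts ++ pvSpecOut z) := by
  induction z with
  | nil => exact ⟨fun acts cur => by simp [pvPost, pvSpecIn], fun acts => by simp [pvPost, pvSpecOut]⟩
  | cons hd tl ih =>
    obtain ⟨w, c⟩ := hd
    constructor
    · intro acts cur
      by_cases hB : c = 'B'
      · simp [List.foldl_cons, pvStepZ, hB, pvSpecIn, ih.1]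
      · by_cases hE : c = 'E'
        · simp [List.foldl_cons, pvStepZ, hE, pvSpecIn, ih.2]
        · simp [List.foldl_cons, pvStepZ, hB, hE, pvSpecIn, ih.1]
    · intro acts
      by_cases hB : c = 'B'
      · simp [List.foldl_cons, pvStepZ, hB, pvSpecOut, ih.1]
      · simp [List.foldl_cons, pvStepZ, hB, pvSpecOut, ih.2]

-- B's scanner computes pvSpecOut / pvSpecIn
theorem pvScan (tx : List String) (pr : List String) :
    (∀ i, (pvScanOut (pr.map pvFirstCh) i).map (fun se =>
        pvJoin (pvWords tx se.1 (se.2 - se.1))) = pvSpecOut (pvZipD (tx.drop i) pr)) ∧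
    (∀ i s, s ≤ i → (pvScanIn (pr.map pvFirstCh) i s).map (fun se =>
        pvJoin (pvWords tx se.1 (se.2 - se.1))) = pvSpecIn (pvZipD (tx.drop i) pr) (pvWords tx s (i - s))) := by
  induction pr with
  | nil =>
    refine ⟨fun i => by simp [pvScanOut, pvZipD, pvSpecOut], fun i s hs => by
      simp [pvScanIn, pvZipD, pvSpecIn]⟩
  | cons p ps ih =>
    have hhead : ∀ i : Nat, (tx.drop i).headD "" = tx.getD i "" := by
      intro i; simp [List.head?_drop, List.getD_eq_getElem?_getD]
    have htail : ∀ i : Nat, (tx.drop i).tail = tx.drop (i + 1) := by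
      intro i; simp [List.tail_drop]
    have hwords : ∀ s i : Nat, s ≤ i →
        pvWords tx s (i - s) ++ [tx.getD i ""] = pvWords tx s (i + 1 - s) := by
      intro s i hs
      have h1 : i + 1 - s = (i - s) + 1 := by omega
      have h2 : s + (i - s) = i := by omega
      simp [pvWords, h1, List.range'_1_concat, h2]
    constructor
    · intro i
      by_cases hB : pvFirstCh p = 'B'
      · have h1 : pvWords tx i (i + 1 - i) = [tx.getD i ""] := by
          have : i + 1 - i = 1 := by omega
          simp [pvWords, this]
        have h2 := ih.2 (i + 1) i (Nat.le_succ i)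
        rw [h1] at h2
        simp [pvScanOut, hB, pvZipD, pvSpecOut, htail, h2]
      · simp [pvScanOut, hB, pvZipD, pvSpecOut, htail, ih.1]
    · intro i s hs
      by_cases hE : pvFirstCh p = 'E'
      · simp [pvScanIn, hE, pvZipD, pvSpecIn, htail, ih.1, ← hwords s i hs]
      · simp [pvScanIn, hE, pvZipD, pvSpecIn, htail,
          ← hwords s i hs, ih.2 (i + 1) s (by omega)]

-- ===== VERDICT (by name: the statement is the Claim_ definition above) =====
theorem extract_acts_py_spec : Claim_equal_extract_acts_py := by
  intro text prediction _ _
  unfold Spec_extract_acts_py extract_acts_py extract_acts_py_alt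
  have hfold : (List.range prediction.length).foldl (pvStepA text prediction) ([], [], false)
      = (pvZipD text prediction).foldl pvStepZ ([], [], false) := by
    rw [← pvZipD_eq prediction text, List.foldl_map]
    rfl
  rw [hfold]
  have hA := (pvFoldA (pvZipD text prediction)).2 []
  have hB := (pvScan text prediction).1 0
  simp only [pvPost] at hA
  simp only [List.drop_zero] at hB
  simp only [pvJoin, pvWords] at hB hA
  rw [hA, hB]
  simp
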